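-- pv_equiv track=rewrite | github.com/subh2003r/Data_Structures_and_Algorithms | 1073-number-of-enclaves/number-of-enclaves.py | bfs_way
-- ===== SOURCE A (Python) =====
-- from collections import deque
--
-- def bfs_way(grid):
--     dq = deque()
--     m, n = len(grid), len(grid[0])
--     directions = [(0,1), (1,0), (-1,0), (0,-1)]
--     count_landCells = 0
--
--     for row in range(m):
--         for col in range(n):
--             if row == 0 or row == m-1 or col == 0 or col == n-1:
--                 if grid[row][col] == 1:
--                     dq.append((row,col))
--                     grid[row][col] = -1  # '-1' -> land can reach off boundary
--
--     while dq:
--         row, col = dq.popleft()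
--         for dr, dc in directions:
--             nr, nc = row+dr, col+dc
--             if 0 <= nr < m and 0 <= nc < n and grid[nr][nc] == 1:
--                 grid[nr][nc] = -1        # connected grid cell '1' which can reach off boundary
--                 dq.append((nr, nc))
--
--     for row in range(m):
--         for col in range(n):
--             if grid[row][col] == 1:
--                 count_landCells += 1
--
--     return count_landCells
-- ===== SOURCE B (Python) =====
-- def bfs_way(grid):
--     m, n = len(grid), len(grid[0])
--     marked = set()
--     changed = True
--     while changed:
--         changed = False
--         for r in range(m):
--             for c in range(n):
--                 if grid[r][c] == 1 and (r, c) not in marked and (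
--                     r == 0 or r == m - 1 or c == 0 or c == n - 1
--                     or (r - 1, c) in marked or (r + 1, c) in marked
--                     or (r, c - 1) in marked or (r, c + 1) in marked
--                 ):
--                     marked.add((r, c))
--                     changed = True
--     return sum(
--         1
--         for r in range(m)
--         for c in range(n)
--         if grid[r][c] == 1 and (r, c) not in marked
--     )
-- ===== Notes on version B (the rewrite author's own statement) =====
-- stated objective: alternative
-- what changed: Replaced the deque-based BFS that floods boundary land by mutating grid cells to -1 with a mutation-free iterate-until-fixpoint relaxation: repeated full-grid sweeps grow a set of boundary-connected land cells until a sweep changes nothing, then land cells outside the set are counted.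
import Mathlib
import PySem

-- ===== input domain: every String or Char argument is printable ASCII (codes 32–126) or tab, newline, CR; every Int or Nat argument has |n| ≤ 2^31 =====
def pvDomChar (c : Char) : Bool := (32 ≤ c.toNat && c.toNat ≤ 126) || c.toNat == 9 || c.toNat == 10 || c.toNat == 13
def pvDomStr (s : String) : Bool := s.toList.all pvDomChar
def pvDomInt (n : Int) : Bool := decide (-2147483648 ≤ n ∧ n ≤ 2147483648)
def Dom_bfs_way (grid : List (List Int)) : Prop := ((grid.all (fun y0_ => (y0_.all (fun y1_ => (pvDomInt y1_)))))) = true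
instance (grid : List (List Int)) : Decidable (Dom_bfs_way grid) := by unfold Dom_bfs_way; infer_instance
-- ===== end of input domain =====

-- B replaces A's deque BFS (which marks reachable land by mutating the grid to -1 in place) by a
-- mutation-free iterate-until-fixpoint relaxation that grows a set of boundary-connected cells;
-- equivalence is about the RETURN value only (A mutates its argument, B does not).

-- ===== PORT A =====
def pvCell (g : List (List Int)) (r c : Int) : Int :=
  PySem.List.pyGetD (PySem.List.pyGetD g r []) c 0

def pvSetC (g : List (List Int)) (r c v : Int) : List (List Int) :=
  PySem.List.pySetD g r (PySem.List.pySetD (PySem.List.pyGetD g r []) c v)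

def pvOnes (g : List (List Int)) : Nat := (g.map (fun row => row.count 1)).sum

def pvDirs : List (Int × Int) := [(0,1), (1,0), (-1,0), (0,-1)]

def pvStep1 (m n r c : Int) (s : List (List Int) × List (Int × Int)) (d : Int × Int) :
    List (List Int) × List (Int × Int) :=
  let nr := r + d.1
  let nc := c + d.2
  if 0 ≤ nr ∧ nr < m ∧ 0 ≤ nc ∧ nc < n ∧ pvCell s.1 nr nc = 1 then
    (pvSetC s.1 nr nc (-1), s.2 ++ [(nr, nc)])
  else s

def pvStep (m n : Int) (g : List (List Int)) (r c : Int) :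
    List (List Int) × List (Int × Int) :=
  pvDirs.foldl (pvStep1 m n r c) (g, [])

-- termination lemma for pvLoop (cited in its decreasing_by)
lemma pvStep_measure (m n : Int) (g0 : List (List Int)) (r c : Int) :
    2 * pvOnes (pvStep m n g0 r c).1 + (pvStep m n g0 r c).2.length ≤ 2 * pvOnes g0 := by
  have hcellN : ∀ (g : List (List Int)) (a b : Int), 0 ≤ a → 0 ≤ b →
      pvCell g a b = (g.getD a.toNat []).getD b.toNat 0 := by
    intro g a b ha hb
    simp [pvCell, PySem.List.pyGetD_of_nonneg _ _ ha, PySem.List.pyGetD_of_nonneg _ _ hb]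
  have hsetN : ∀ (g : List (List Int)) (a b v : Int), 0 ≤ a → 0 ≤ b →
      pvSetC g a b v = g.set a.toNat ((g.getD a.toNat []).set b.toNat v) := by
    intro g a b v ha hb
    simp [pvSetC, PySem.List.pySetD_of_nonneg _ _ ha, PySem.List.pySetD_of_nonneg _ _ hb,
      PySem.List.pyGetD_of_nonneg _ _ ha]
  have hbounds : ∀ (g : List (List Int)) (i j : Nat), (g.getD i []).getD j 0 = 1 →
      i < g.length ∧ j < (g.getD i []).length := by
    intro g i j h
    have hi : i < g.length := by
      by_contra hi
      rw [show g.getD i [] = [] from List.getD_eq_default _ _ (by omega)] at h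
      simp at h
    have hj : j < (g.getD i []).length := by
      by_contra hj
      rw [show (g.getD i []).getD j 0 = 0 from List.getD_eq_default _ _ (by omega)] at h
      omega
    exact ⟨hi, hj⟩
  have hsum : ∀ (g : List (List Int)) (i : Nat) (row' : List Int), i < g.length →
      ((g.set i row').map (fun row => row.count 1)).sum + (g.getD i []).count 1
        = (g.map (fun row => row.count 1)).sum + row'.count 1 := by
    intro g
    induction g with
    | nil => intro i row' h; simp at h
    | cons a g ih =>
        intro i row' h
        cases i with
        | zero => simp [List.getD]; omega
        | succ i =>
            simp only [List.set, List.map, List.sum_cons, List.getD_cons_succ]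
            have := ih i row' (by simpa using h)
            omega
  have hones : ∀ (g : List (List Int)) (i j : Nat), (g.getD i []).getD j 0 = 1 →
      pvOnes (g.set i ((g.getD i []).set j (-1))) + 1 = pvOnes g := by
    intro g i j h
    obtain ⟨hi, hj⟩ := hbounds g i j h
    have hrj : (g.getD i [])[j] = 1 := by
      rw [← List.getD_eq_getElem (g.getD i []) 0 hj]; exact h
    have hmem : (1 : Int) ∈ g.getD i [] := hrj ▸ List.getElem_mem hj
    have hpos := List.count_pos_iff.2 hmem
    have hcnt : ((g.getD i []).set j (-1)).count 1 + 1 = (g.getD i []).count 1 := by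
      rw [List.count_set hj]
      simp only [List.getD_eq_getElem?_getD] at hrj hpos ⊢
      simp [hrj]
      omega
    have hs := hsum g i ((g.getD i []).set j (-1)) hi
    unfold pvOnes
    omega
  have hgo : ∀ (ds : List (Int × Int)) (g : List (List Int)) (acc : List (Int × Int)),
      2 * pvOnes (ds.foldl (pvStep1 m n r c) (g, acc)).1
        + (ds.foldl (pvStep1 m n r c) (g, acc)).2.length
      ≤ 2 * pvOnes g + acc.length := by
    intro ds
    induction ds with
    | nil => intro g acc; simp
    | cons d ds ih =>
        intro g acc
        simp only [List.foldl_cons]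
        by_cases hg : 0 ≤ r + d.1 ∧ r + d.1 < m ∧ 0 ≤ c + d.2 ∧ c + d.2 < n ∧
            pvCell g (r + d.1) (c + d.2) = 1
        · rw [show pvStep1 m n r c (g, acc) d
              = (pvSetC g (r + d.1) (c + d.2) (-1), acc ++ [(r + d.1, c + d.2)]) from by
            simp [pvStep1, hg]]
          obtain ⟨h1, h2, h3, h4, h5⟩ := hg
          rw [hcellN g _ _ h1 h3] at h5
          have hone := hones g _ _ h5
          have := ih (pvSetC g (r + d.1) (c + d.2) (-1)) (acc ++ [(r + d.1, c + d.2)])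
          rw [hsetN g _ _ (-1) h1 h3] at *
          simp only [List.length_append, List.length_cons, List.length_nil] at *
          omega
        · rw [show pvStep1 m n r c (g, acc) d = (g, acc) from by simp [pvStep1, hg]]
          exact ih g acc
  simpa using hgo pvDirs g0 []

def pvLoop (m n : Int) (g : List (List Int)) (dq : List (Int × Int)) : List (List Int) :=
  match dq with
  | [] => g
  | (r, c) :: rest =>
      pvLoop m n (pvStep m n g r c).1 (rest ++ (pvStep m n g r c).2)
termination_by 2 * pvOnes g + dq.length
decreasing_by
  have h := pvStep_measure m n g r c
  simp only [List.length_append, List.length_cons]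
  omega

def pvScanB (m n : Int) (s : List (List Int) × List (Int × Int)) (p : Int × Int) :
    List (List Int) × List (Int × Int) :=
  if p.1 = 0 ∨ p.1 = m - 1 ∨ p.2 = 0 ∨ p.2 = n - 1 then
    if pvCell s.1 p.1 p.2 = 1 then (pvSetC s.1 p.1 p.2 (-1), s.2 ++ [p]) else s
  else s

def pvScan (m n : Int) (g : List (List Int)) : List (List Int) × List (Int × Int) :=
  (PySem.List.pyRange 0 m 1).foldl (fun s r =>
    (PySem.List.pyRange 0 n 1).foldl (fun s c => pvScanB m n s (r, c)) s) (g, [])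

def bfs_way (grid : List (List Int)) : Int :=
  let m : Int := grid.length
  let n : Int := grid.headI.length   -- len(grid[0]); Pre_ excludes grid = [] (IndexError)
  let s := pvScan m n grid
  let gf := pvLoop m n s.1 s.2
  (PySem.List.pyRange 0 m 1).foldl (fun acc r =>
    (PySem.List.pyRange 0 n 1).foldl (fun acc c =>
      if pvCell gf r c = 1 then acc + 1 else acc) acc) 0

-- ===== PORT B =====

-- ===== PORT B =====
abbrev pvG (g : List (List Int)) (m n : Int) (s : List (Int × Int)) (p : Int × Int) : Prop :=
  pvCell g p.1 p.2 = 1 ∧ p ∉ s ∧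
    (p.1 = 0 ∨ p.1 = m - 1 ∨ p.2 = 0 ∨ p.2 = n - 1 ∨
     (p.1 - 1, p.2) ∈ s ∨ (p.1 + 1, p.2) ∈ s ∨ (p.1, p.2 - 1) ∈ s ∨ (p.1, p.2 + 1) ∈ s)

def pvSweepB (g : List (List Int)) (m n : Int)
    (s : PySem.Set (Int × Int) × Bool) (p : Int × Int) : PySem.Set (Int × Int) × Bool :=
  if pvG g m n s.1 p then (PySem.Set.add s.1 p, true) else s

def pvSweep (g : List (List Int)) (m n : Int) (s : PySem.Set (Int × Int) × Bool) :
    PySem.Set (Int × Int) × Bool :=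
  (PySem.List.pyRange 0 m 1).foldl (fun s r =>
    (PySem.List.pyRange 0 n 1).foldl (fun s c => pvSweepB g m n s (r, c)) s) s

def pvPos (m n : Int) : List (Int × Int) :=
  (PySem.List.pyRange 0 m 1).flatMap (fun r => (PySem.List.pyRange 0 n 1).map (fun c => (r, c)))

def pvRem (g : List (List Int)) (m n : Int) (s : PySem.Set (Int × Int)) : Nat :=
  ((pvPos m n).filter (fun p => pvCell g p.1 p.2 == 1 && !(decide (p ∈ s)))).length

-- termination lemma for pvSweeps (cited in its decreasing_by)
lemma pvSweep_progress (g : List (List Int)) (m n : Int) (s : PySem.Set (Int × Int))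
    (h : (pvSweep g m n (s, false)).2 = true) :
    pvRem g m n (pvSweep g m n (s, false)).1 < pvRem g m n s := by
  have hfold : ∀ (init : PySem.Set (Int × Int) × Bool),
      pvSweep g m n init = (pvPos m n).foldl (pvSweepB g m n) init := by
    intro init
    unfold pvSweep pvPos
    generalize PySem.List.pyRange 0 m 1 = rs
    induction rs generalizing init with
    | nil => simp
    | cons r rs ih => simp [List.foldl_append, List.foldl_map, ih]
  have hgo : ∀ (l : List (Int × Int)) (t : PySem.Set (Int × Int)) (ch : Bool),
      (∀ x ∈ t, x ∈ (l.foldl (pvSweepB g m n) (t, ch)).1)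
      ∧ ((l.foldl (pvSweepB g m n) (t, ch)).2 = ch ∨
         ∃ p ∈ l, pvCell g p.1 p.2 = 1 ∧ p ∉ t ∧ p ∈ (l.foldl (pvSweepB g m n) (t, ch)).1) := by
    intro l
    induction l with
    | nil => intro t ch; exact ⟨fun x hx => hx, Or.inl rfl⟩
    | cons p l ih =>
        intro t ch
        simp only [List.foldl_cons]
        by_cases hG : pvG g m n t p
        · rw [show pvSweepB g m n (t, ch) p = (PySem.Set.add t p, true) from by
            simp [pvSweepB, hG]]
          obtain ⟨ihsub, _⟩ := ih (PySem.Set.add t p) true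
          have hsub : ∀ x ∈ t, x ∈ (l.foldl (pvSweepB g m n) (PySem.Set.add t p, true)).1 :=
            fun x hx => ihsub x ((PySem.Set.mem_add _ _ _).2 (Or.inl hx))
          refine ⟨hsub, Or.inr ⟨p, List.mem_cons_self, hG.1, hG.2.1, ?_⟩⟩
          exact ihsub p ((PySem.Set.mem_add _ _ _).2 (Or.inr rfl))
        · rw [show pvSweepB g m n (t, ch) p = (t, ch) from by simp [pvSweepB, hG]]
          obtain ⟨ihsub, ihw⟩ := ih t ch
          refine ⟨ihsub, ?_⟩
          rcases ihw with hh | ⟨q, hq, h1, h2, h3⟩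
          · exact Or.inl hh
          · exact Or.inr ⟨q, List.mem_cons_of_mem _ hq, h1, h2, h3⟩
  have hfle : ∀ (l : List (Int × Int)) (p q : (Int × Int) → Bool),
      (∀ x, q x = true → p x = true) → (l.filter q).length ≤ (l.filter p).length := by
    intro l p q hmono
    induction l with
    | nil => simp
    | cons a l ih =>
        by_cases hqa : q a = true
        · rw [List.filter_cons_of_pos hqa, List.filter_cons_of_pos (hmono a hqa)]
          simpa using ih
        · rw [List.filter_cons_of_neg (by simp [hqa])]
          by_cases hpa : p a = true
          · rw [List.filter_cons_of_pos hpa]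
            simp only [List.length_cons]; omega
          · rw [List.filter_cons_of_neg (by simp [hpa])]
            exact ih
  have hflt : ∀ (l : List (Int × Int)) (p q : (Int × Int) → Bool),
      (∀ x, q x = true → p x = true) → ∀ x0, x0 ∈ l → p x0 = true → q x0 = false →
      (l.filter q).length < (l.filter p).length := by
    intro l p q hmono
    induction l with
    | nil => intro x0 hx0 _ _; simp at hx0
    | cons a l ih =>
        intro x0 hx0 hp hq
        rcases List.mem_cons.1 hx0 with rfl | hx
        · rw [List.filter_cons_of_pos hp, List.filter_cons_of_neg (by simp [hq])]
          have := hfle l p q hmono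
          simp only [List.length_cons]; omega
        · by_cases hqa : q a = true
          · rw [List.filter_cons_of_pos hqa, List.filter_cons_of_pos (hmono a hqa)]
            simpa using ih x0 hx hp hq
          · rw [List.filter_cons_of_neg (by simp [hqa])]
            by_cases hpa : p a = true
            · rw [List.filter_cons_of_pos hpa]
              have := ih x0 hx hp hq
              simp only [List.length_cons]; omega
            · rw [List.filter_cons_of_neg (by simp [hpa])]
              exact ih x0 hx hp hq
  rw [hfold] at h ⊢
  obtain ⟨hsub, hw⟩ := hgo (pvPos m n) s false
  rcases hw with hfix | ⟨p, hp, h1, h2, h3⟩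
  · rw [hfix] at h; cases h
  · unfold pvRem
    refine hflt (pvPos m n) _ _ ?_ p hp ?_ ?_
    · intro x hx
      simp only [Bool.and_eq_true, beq_iff_eq, Bool.not_eq_eq_eq_not, Bool.not_true,
        decide_eq_false_iff_not] at hx ⊢
      exact ⟨hx.1, fun hmem => hx.2 (hsub x hmem)⟩
    · simp [h1, h2]
    · simp [h1, h3]

def pvSweeps (g : List (List Int)) (m n : Int) (s : PySem.Set (Int × Int)) :
    PySem.Set (Int × Int) :=
  let t := pvSweep g m n (s, false)
  if t.2 then pvSweeps g m n t.1 else t.1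
termination_by pvRem g m n s
decreasing_by exact pvSweep_progress g m n s (by assumption)

def bfs_way_alt (grid : List (List Int)) : Int :=
  let m : Int := grid.length
  let n : Int := grid.headI.length
  let marked := pvSweeps grid m n PySem.Set.empty
  (PySem.List.pyRange 0 m 1).foldl (fun acc r =>
    (PySem.List.pyRange 0 n 1).foldl (fun acc c =>
      if pvCell grid r c = 1 ∧ (r, c) ∉ marked then acc + 1 else acc) acc) 0


-- ===== PRECONDITION & SPEC =====
-- Pre_ excludes exactly the inputs where the Python A raises IndexError: the empty grid
-- (grid[0]) and ragged grids with a row shorter than the first row (the counting pass reads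
-- grid[row][col] for every col < len(grid[0])).
def Pre_bfs_way (grid : List (List Int)) : Prop :=
  grid ≠ [] ∧ ∀ row ∈ grid, grid.headI.length ≤ row.length
instance (grid : List (List Int)) : Decidable (Pre_bfs_way grid) := by
  unfold Pre_bfs_way; infer_instance
def pvWitness_bfs_way : List (List Int) := [[1, 0], [0, 1]]
def Spec_bfs_way (grid : List (List Int)) (out : Int) : Prop := out = bfs_way_alt grid
instance (grid : List (List Int)) (out : Int) : Decidable (Spec_bfs_way grid out) := by
  unfold Spec_bfs_way; infer_instance

-- ===== CLAIM (what is proved, stated in full; the proofs are below) =====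
def Claim_equal_bfs_way : Prop := ∀ (grid : List (List Int)), Dom_bfs_way grid → Pre_bfs_way grid → Spec_bfs_way grid (bfs_way grid)

-- ===== LEMMAS AND PROOFS =====
lemma pvCell_nonneg (g : List (List Int)) {r c : Int} (hr : 0 ≤ r) (hc : 0 ≤ c) :
    pvCell g r c = (g.getD r.toNat []).getD c.toNat 0 := by
  simp [pvCell, PySem.List.pyGetD_of_nonneg _ _ hr, PySem.List.pyGetD_of_nonneg _ _ hc]

lemma pvSetC_nonneg (g : List (List Int)) {r c : Int} (v : Int) (hr : 0 ≤ r) (hc : 0 ≤ c) :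
    pvSetC g r c v = g.set r.toNat ((g.getD r.toNat []).set c.toNat v) := by
  simp [pvSetC, PySem.List.pySetD_of_nonneg _ _ hr, PySem.List.pySetD_of_nonneg _ _ hc,
    PySem.List.pyGetD_of_nonneg _ _ hr]

lemma pv_getD_bounds {g : List (List Int)} {i j : Nat} (h : (g.getD i []).getD j 0 = 1) :
    i < g.length ∧ j < (g.getD i []).length := by
  have hi : i < g.length := by
    by_contra hi
    rw [show g.getD i [] = [] from List.getD_eq_default _ _ (by omega)] at h
    simp at h
  have hj : j < (g.getD i []).length := by
    by_contra hj
    rw [show (g.getD i []).getD j 0 = 0 from List.getD_eq_default _ _ (by omega)] at h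
    omega
  exact ⟨hi, hj⟩

lemma pv_foldl_nested {σ : Type} (f : σ → (Int × Int) → σ) (m n : Int) (init : σ) :
    (PySem.List.pyRange 0 m 1).foldl (fun s r =>
      (PySem.List.pyRange 0 n 1).foldl (fun s c => f s (r, c)) s) init
    = (pvPos m n).foldl f init := by
  unfold pvPos
  generalize PySem.List.pyRange 0 m 1 = rs
  induction rs generalizing init with
  | nil => simp
  | cons r rs ih => simp [List.foldl_append, List.foldl_map, ih]

lemma pv_sweep_true (g : List (List Int)) (m n : Int) :
    ∀ (l : List (Int × Int)) (s : PySem.Set (Int × Int)),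
    (l.foldl (pvSweepB g m n) (s, true)).2 = true := by
  intro l
  induction l with
  | nil => intro s; rfl
  | cons p l ih =>
      intro s
      simp only [List.foldl_cons, pvSweepB]
      split <;> exact ih _

lemma pvSweep_eq_fold (g : List (List Int)) (m n : Int) (s : PySem.Set (Int × Int) × Bool) :
    pvSweep g m n s = (pvPos m n).foldl (pvSweepB g m n) s := by
  unfold pvSweep
  exact pv_foldl_nested (pvSweepB g m n) m n s

-- ===== proof helpers =====
def pvInb (m n : Int) (p : Int × Int) : Prop := 0 ≤ p.1 ∧ p.1 < m ∧ 0 ≤ p.2 ∧ p.2 < n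
def pvBdy (m n : Int) (p : Int × Int) : Prop := p.1 = 0 ∨ p.1 = m - 1 ∨ p.2 = 0 ∨ p.2 = n - 1
def pvAdj (p q : Int × Int) : Prop := ∃ d ∈ pvDirs, q = (p.1 + d.1, p.2 + d.2)

inductive pvReach (g : List (List Int)) (m n : Int) : Int × Int → Prop where
  | base (p : Int × Int) (h1 : pvInb m n p) (h2 : pvBdy m n p) (h3 : pvCell g p.1 p.2 = 1) :
      pvReach g m n p
  | step (p q : Int × Int) (h : pvReach g m n p) (ha : pvAdj p q) (h1 : pvInb m n q)
      (h3 : pvCell g q.1 q.2 = 1) : pvReach g m n q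

def pvM (g0 g : List (List Int)) (p : Int × Int) : Prop :=
  pvCell g p.1 p.2 ≠ pvCell g0 p.1 p.2

lemma pvReach_inb {g : List (List Int)} {m n : Int} {p : Int × Int}
    (h : pvReach g m n p) : pvInb m n p := by
  cases h with
  | base _ h1 _ _ => exact h1
  | step _ _ _ _ h1 _ => exact h1

lemma pv_getD_set {α : Type} (l : List α) (i i' : Nat) (x : α) (d : α) (hi : i < l.length) :
    (l.set i x).getD i' d = if i' = i then x else l.getD i' d := by
  simp only [List.getD_eq_getElem?_getD, List.getElem?_set]
  split
  · rename_i h; subst h; simp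
  · rename_i h; rw [if_neg (fun hh => h hh.symm)]

lemma pvCell_setC_self {g : List (List Int)} {r c : Int} (v : Int)
    (hr : 0 ≤ r) (hc : 0 ≤ c) (h1 : pvCell g r c = 1) :
    pvCell (pvSetC g r c v) r c = v := by
  rw [pvCell_nonneg g hr hc] at h1
  obtain ⟨hi, hj⟩ := pv_getD_bounds h1
  rw [pvSetC_nonneg g v hr hc, pvCell_nonneg _ hr hc]
  rw [pv_getD_set _ _ _ _ _ hi, if_pos rfl, pv_getD_set _ _ _ _ _ hj, if_pos rfl]

lemma pvCell_setC_ne {g : List (List Int)} {r c : Int} (v : Int) {r' c' : Int}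
    (hr : 0 ≤ r) (hc : 0 ≤ c) (hr' : 0 ≤ r') (hc' : 0 ≤ c')
    (h1 : pvCell g r c = 1) (hne : (r', c') ≠ (r, c)) :
    pvCell (pvSetC g r c v) r' c' = pvCell g r' c' := by
  rw [pvCell_nonneg g hr hc] at h1
  obtain ⟨hi, hj⟩ := pv_getD_bounds h1
  rw [pvSetC_nonneg g v hr hc, pvCell_nonneg _ hr' hc', pvCell_nonneg g hr' hc']
  by_cases hrr : r'.toNat = r.toNat
  · have hre : r' = r := by omega
    have hcc : c'.toNat ≠ c.toNat := by
      intro h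
      exact hne (by rw [hre]; congr 1; omega)
    rw [pv_getD_set _ _ _ _ _ hi, if_pos hrr, pv_getD_set _ _ _ _ _ hj, if_neg hcc, hrr]
  · rw [pv_getD_set _ _ _ _ _ hi, if_neg hrr]

def pvInvS (g0 : List (List Int)) (m n : Int) (g : List (List Int))
    (dq : List (Int × Int)) : Prop :=
  (∀ p : Int × Int, 0 ≤ p.1 → 0 ≤ p.2 → pvM g0 g p →
    pvCell g p.1 p.2 = -1 ∧ pvCell g0 p.1 p.2 = 1 ∧ pvInb m n p ∧ pvBdy m n p)
  ∧ (∀ p : Int × Int, 0 ≤ p.1 → 0 ≤ p.2 → (pvM g0 g p ↔ p ∈ dq))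
  ∧ (∀ p ∈ dq, pvInb m n p)

lemma pv_scan_go (g0 : List (List Int)) (m n : Int) :
    ∀ (l : List (Int × Int)) (g : List (List Int)) (dq : List (Int × Int)),
    (∀ p ∈ l, pvInb m n p) → pvInvS g0 m n g dq →
    pvInvS g0 m n (l.foldl (pvScanB m n) (g, dq)).1 (l.foldl (pvScanB m n) (g, dq)).2
    ∧ (∀ p : Int × Int, 0 ≤ p.1 → 0 ≤ p.2 → pvM g0 g p →
        pvM g0 (l.foldl (pvScanB m n) (g, dq)).1 p)
    ∧ (∀ p ∈ l, pvBdy m n p → pvCell g0 p.1 p.2 = 1 →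
        pvM g0 (l.foldl (pvScanB m n) (g, dq)).1 p) := by
  intro l
  induction l with
  | nil =>
      intro g dq _ hInv
      exact ⟨hInv, fun _ _ _ h => h, by simp⟩
  | cons p l ih =>
      intro g dq hl hInv
      obtain ⟨h1, h2, h3⟩ := hInv
      have hpin : pvInb m n p := hl p List.mem_cons_self
      have hpr : 0 ≤ p.1 := hpin.1
      have hpc : 0 ≤ p.2 := hpin.2.2.1
      have hl' : ∀ q ∈ l, pvInb m n q := fun q hq => hl q (List.mem_cons_of_mem _ hq)
      simp only [List.foldl_cons]
      by_cases hbd : p.1 = 0 ∨ p.1 = m - 1 ∨ p.2 = 0 ∨ p.2 = n - 1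
      · by_cases hcell : pvCell g p.1 p.2 = 1
        · -- boundary land cell: marked and enqueued
          rw [show pvScanB m n (g, dq) p = (pvSetC g p.1 p.2 (-1), dq ++ [p]) from by
            simp [pvScanB, hbd, hcell]]
          have hnM : ¬ pvM g0 g p := fun hM => by
            have := (h1 p hpr hpc hM).1; omega
          have hg0p : pvCell g0 p.1 p.2 = 1 := by
            have h' : pvCell g p.1 p.2 = pvCell g0 p.1 p.2 := not_not.1 hnM
            omega
          have hMp : pvM g0 (pvSetC g p.1 p.2 (-1)) p := by
            unfold pvM
            rw [pvCell_setC_self (-1) hpr hpc hcell, hg0p]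
            omega
          have hframe : ∀ q : Int × Int, 0 ≤ q.1 → 0 ≤ q.2 → q ≠ p →
              pvCell (pvSetC g p.1 p.2 (-1)) q.1 q.2 = pvCell g q.1 q.2 := by
            intro q hq1 hq2 hqp
            exact pvCell_setC_ne (-1) hpr hpc hq1 hq2 hcell (by
              intro h
              exact hqp (Prod.ext (congrArg Prod.fst h) (congrArg Prod.snd h)))
          have h1' : ∀ q : Int × Int, 0 ≤ q.1 → 0 ≤ q.2 → pvM g0 (pvSetC g p.1 p.2 (-1)) q →
              pvCell (pvSetC g p.1 p.2 (-1)) q.1 q.2 = -1 ∧ pvCell g0 q.1 q.2 = 1 ∧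
              pvInb m n q ∧ pvBdy m n q := by
            intro q hq1 hq2 hM
            by_cases hqp : q = p
            · subst hqp
              exact ⟨pvCell_setC_self (-1) hpr hpc hcell, hg0p, hpin, hbd⟩
            · rw [pvM, hframe q hq1 hq2 hqp] at hM
              obtain ⟨a, b, c, d⟩ := h1 q hq1 hq2 hM
              exact ⟨by rw [hframe q hq1 hq2 hqp]; exact a, b, c, d⟩
          have h2' : ∀ q : Int × Int, 0 ≤ q.1 → 0 ≤ q.2 →
              (pvM g0 (pvSetC g p.1 p.2 (-1)) q ↔ q ∈ dq ++ [p]) := by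
            intro q hq1 hq2
            by_cases hqp : q = p
            · subst hqp; simp [hMp]
            · rw [pvM, hframe q hq1 hq2 hqp, ← pvM, h2 q hq1 hq2]
              simp [hqp]
          have h3' : ∀ q ∈ dq ++ [p], pvInb m n q := by
            intro q hq
            rcases List.mem_append.1 hq with hq | hq
            · exact h3 q hq
            · simp at hq; subst hq; exact hpin
          obtain ⟨ihInv, ihmono, ihpost⟩ :=
            ih (pvSetC g p.1 p.2 (-1)) (dq ++ [p]) hl' ⟨h1', h2', h3'⟩
          have hmono' : ∀ q : Int × Int, 0 ≤ q.1 → 0 ≤ q.2 → pvM g0 g q →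
              pvM g0 (l.foldl (pvScanB m n) (pvSetC g p.1 p.2 (-1), dq ++ [p])).1 q := by
            intro q hq1 hq2 hM
            have hqp : q ≠ p := fun h => hnM (h ▸ hM)
            exact ihmono q hq1 hq2 (by rw [pvM, hframe q hq1 hq2 hqp]; exact hM)
          refine ⟨ihInv, hmono', ?_⟩
          intro q hq hbq hcq
          rcases List.mem_cons.1 hq with rfl | hq'
          · exact ihmono q hpr hpc hMp
          · exact ihpost q hq' hbq hcq
        · -- boundary cell that is not (currently) 1: if it is land in g0 it is already marked
          rw [show pvScanB m n (g, dq) p = (g, dq) from by simp [pvScanB, hbd, hcell]]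
          obtain ⟨ihInv, ihmono, ihpost⟩ := ih g dq hl' ⟨h1, h2, h3⟩
          refine ⟨ihInv, ihmono, ?_⟩
          intro q hq hbq hcq
          rcases List.mem_cons.1 hq with rfl | hq'
          · exact ihmono q hpr hpc (by unfold pvM; omega)
          · exact ihpost q hq' hbq hcq
      · rw [show pvScanB m n (g, dq) p = (g, dq) from by simp [pvScanB, hbd]]
        obtain ⟨ihInv, ihmono, ihpost⟩ := ih g dq hl' ⟨h1, h2, h3⟩
        refine ⟨ihInv, ihmono, ?_⟩
        intro q hq hbq hcq
        rcases List.mem_cons.1 hq with rfl | hq'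
        · exact absurd hbq hbd
        · exact ihpost q hq' hbq hcq


def pvInvA (g0 : List (List Int)) (m n : Int) (g : List (List Int))
    (dq : List (Int × Int)) : Prop :=
  (∀ p : Int × Int, 0 ≤ p.1 → 0 ≤ p.2 → pvM g0 g p →
    pvCell g p.1 p.2 = -1 ∧ pvCell g0 p.1 p.2 = 1 ∧ pvInb m n p ∧ pvReach g0 m n p)
  ∧ (∀ p ∈ dq, pvInb m n p ∧ pvM g0 g p)
  ∧ (∀ p : Int × Int, 0 ≤ p.1 → 0 ≤ p.2 → pvM g0 g p → p ∉ dq →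
      ∀ q : Int × Int, pvAdj p q → pvInb m n q → pvCell g0 q.1 q.2 = 1 → pvM g0 g q)
  ∧ (∀ p : Int × Int, pvInb m n p → pvBdy m n p → pvCell g0 p.1 p.2 = 1 → pvM g0 g p)

lemma pv_step_go (g0 : List (List Int)) (m n r c : Int)
    (hre : pvReach g0 m n (r, c)) :
    ∀ (ds : List (Int × Int)) (g : List (List Int)) (acc : List (Int × Int)),
    (∀ d ∈ ds, d ∈ pvDirs) →
    (∀ p : Int × Int, 0 ≤ p.1 → 0 ≤ p.2 → pvM g0 g p →
      pvCell g p.1 p.2 = -1 ∧ pvCell g0 p.1 p.2 = 1 ∧ pvInb m n p ∧ pvReach g0 m n p) →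
    (∀ p ∈ acc, pvInb m n p ∧ pvM g0 g p) →
    (∀ p : Int × Int, 0 ≤ p.1 → 0 ≤ p.2 →
       pvM g0 (ds.foldl (pvStep1 m n r c) (g, acc)).1 p →
       pvCell (ds.foldl (pvStep1 m n r c) (g, acc)).1 p.1 p.2 = -1 ∧
       pvCell g0 p.1 p.2 = 1 ∧ pvInb m n p ∧ pvReach g0 m n p)
    ∧ (∀ p : Int × Int, 0 ≤ p.1 → 0 ≤ p.2 → pvM g0 g p →
       pvM g0 (ds.foldl (pvStep1 m n r c) (g, acc)).1 p)
    ∧ (∀ p : Int × Int, 0 ≤ p.1 → 0 ≤ p.2 →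
       pvM g0 (ds.foldl (pvStep1 m n r c) (g, acc)).1 p →
       pvM g0 g p ∨ p ∈ (ds.foldl (pvStep1 m n r c) (g, acc)).2)
    ∧ (∀ p ∈ (ds.foldl (pvStep1 m n r c) (g, acc)).2,
       pvInb m n p ∧ pvM g0 (ds.foldl (pvStep1 m n r c) (g, acc)).1 p)
    ∧ (∀ p ∈ acc, p ∈ (ds.foldl (pvStep1 m n r c) (g, acc)).2)
    ∧ (∀ d ∈ ds, pvInb m n (r + d.1, c + d.2) → pvCell g0 (r + d.1) (c + d.2) = 1 →
       pvM g0 (ds.foldl (pvStep1 m n r c) (g, acc)).1 (r + d.1, c + d.2)) := by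
  intro ds
  induction ds with
  | nil =>
      intro g acc _ h1 hacc
      exact ⟨h1, fun _ _ _ h => h, fun p _ _ h => Or.inl h, hacc, fun p h => h, by simp⟩
  | cons d ds ih =>
      intro g acc hds h1 hacc
      have hdmem : d ∈ pvDirs := hds d List.mem_cons_self
      have hds' : ∀ e ∈ ds, e ∈ pvDirs := fun e he => hds e (List.mem_cons_of_mem _ he)
      simp only [List.foldl_cons]
      by_cases hG : 0 ≤ r + d.1 ∧ r + d.1 < m ∧ 0 ≤ c + d.2 ∧ c + d.2 < n ∧
          pvCell g (r + d.1) (c + d.2) = 1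
      · rw [show pvStep1 m n r c (g, acc) d
            = (pvSetC g (r + d.1) (c + d.2) (-1), acc ++ [(r + d.1, c + d.2)]) from by
          simp only [pvStep1]; rw [if_pos hG]]
        obtain ⟨ha1, ha2, ha3, ha4, hcell⟩ := hG
        have hqin : pvInb m n (r + d.1, c + d.2) := ⟨ha1, ha2, ha3, ha4⟩
        have hnM : ¬ pvM g0 g (r + d.1, c + d.2) := fun hM => by
          have := (h1 _ ha1 ha3 hM).1; simp only at this; omega
        have hg0q : pvCell g0 (r + d.1) (c + d.2) = 1 := by
          unfold pvM at hnM
          simp only [not_not] at hnM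
          omega
        have hreq : pvReach g0 m n (r + d.1, c + d.2) :=
          pvReach.step (r, c) _ hre ⟨d, hdmem, rfl⟩ hqin hg0q
        have hframe : ∀ q : Int × Int, 0 ≤ q.1 → 0 ≤ q.2 → q ≠ (r + d.1, c + d.2) →
            pvCell (pvSetC g (r + d.1) (c + d.2) (-1)) q.1 q.2 = pvCell g q.1 q.2 := by
          intro q hq1 hq2 hqp
          exact pvCell_setC_ne (-1) ha1 ha3 hq1 hq2 hcell (by
            intro h
            exact hqp (Prod.ext (congrArg Prod.fst h) (congrArg Prod.snd h)))
        have hMq : pvM g0 (pvSetC g (r + d.1) (c + d.2) (-1)) (r + d.1, c + d.2) := by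
          unfold pvM
          rw [pvCell_setC_self (-1) ha1 ha3 hcell]
          simp only
          omega
        have h1' : ∀ q : Int × Int, 0 ≤ q.1 → 0 ≤ q.2 →
            pvM g0 (pvSetC g (r + d.1) (c + d.2) (-1)) q →
            pvCell (pvSetC g (r + d.1) (c + d.2) (-1)) q.1 q.2 = -1 ∧
            pvCell g0 q.1 q.2 = 1 ∧ pvInb m n q ∧ pvReach g0 m n q := by
          intro q hq1 hq2 hM
          by_cases hqp : q = (r + d.1, c + d.2)
          · subst hqp
            exact ⟨pvCell_setC_self (-1) ha1 ha3 hcell, hg0q, hqin, hreq⟩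
          · rw [pvM, hframe q hq1 hq2 hqp] at hM
            obtain ⟨a, b, cc, dd⟩ := h1 q hq1 hq2 hM
            exact ⟨by rw [hframe q hq1 hq2 hqp]; exact a, b, cc, dd⟩
        have hmono1 : ∀ q : Int × Int, 0 ≤ q.1 → 0 ≤ q.2 → pvM g0 g q →
            pvM g0 (pvSetC g (r + d.1) (c + d.2) (-1)) q := by
          intro q hq1 hq2 hM
          have hqp : q ≠ (r + d.1, c + d.2) := fun h => hnM (h ▸ hM)
          rw [pvM, hframe q hq1 hq2 hqp]; exact hM
        have hacc' : ∀ p ∈ acc ++ [(r + d.1, c + d.2)],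
            pvInb m n p ∧ pvM g0 (pvSetC g (r + d.1) (c + d.2) (-1)) p := by
          intro p hp
          rcases List.mem_append.1 hp with hp | hp
          · obtain ⟨hin, hM⟩ := hacc p hp
            exact ⟨hin, hmono1 p hin.1 hin.2.2.1 hM⟩
          · simp only [List.mem_singleton] at hp; subst hp; exact ⟨hqin, hMq⟩
        obtain ⟨ih1, ih2, ih3, ih4, ih5, ih6⟩ :=
          ih (pvSetC g (r + d.1) (c + d.2) (-1)) (acc ++ [(r + d.1, c + d.2)]) hds' h1' hacc'
        refine ⟨ih1, ?_, ?_, ih4, ?_, ?_⟩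
        · intro q hq1 hq2 hM
          exact ih2 q hq1 hq2 (hmono1 q hq1 hq2 hM)
        · intro q hq1 hq2 hM
          rcases ih3 q hq1 hq2 hM with hM' | hmem
          · by_cases hqp : q = (r + d.1, c + d.2)
            · subst hqp
              exact Or.inr (ih5 _ (List.mem_append.2 (Or.inr (by simp))))
            · exact Or.inl (by rw [pvM, ← hframe q hq1 hq2 hqp]; exact hM')
          · exact Or.inr hmem
        · intro p hp
          exact ih5 p (List.mem_append.2 (Or.inl hp))
        · intro e he hein hecell
          rcases List.mem_cons.1 he with rfl | he'
          · exact ih2 _ ha1 ha3 hMq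
          · exact ih6 e he' hein hecell
      · rw [show pvStep1 m n r c (g, acc) d = (g, acc) from by
          simp only [pvStep1]; rw [if_neg hG]]
        obtain ⟨ih1, ih2, ih3, ih4, ih5, ih6⟩ := ih g acc hds' h1 hacc
        refine ⟨ih1, ih2, ih3, ih4, ih5, ?_⟩
        intro e he hein hecell
        rcases List.mem_cons.1 he with rfl | he'
        · have hMe : pvM g0 g (r + e.1, c + e.2) := by
            unfold pvM
            intro hEq
            exact hG ⟨hein.1, hein.2.1, hein.2.2.1, hein.2.2.2, by
              simp only at hEq ⊢
              omega⟩
          exact ih2 _ hein.1 hein.2.2.1 hMe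
        · exact ih6 e he' hein hecell


lemma pv_loop_base (g0 : List (List Int)) (m n : Int) (g : List (List Int))
    (hInv : pvInvA g0 m n g []) :
    (∀ p : Int × Int, 0 ≤ p.1 → 0 ≤ p.2 → pvM g0 g p →
       pvCell g p.1 p.2 = -1 ∧ pvCell g0 p.1 p.2 = 1)
    ∧ (∀ p : Int × Int, 0 ≤ p.1 → 0 ≤ p.2 → (pvM g0 g p ↔ pvReach g0 m n p)) := by
  obtain ⟨h1, _, h3, h4⟩ := hInv
  refine ⟨fun p a b h => ⟨(h1 p a b h).1, (h1 p a b h).2.1⟩,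
    fun p a b => ⟨fun h => (h1 p a b h).2.2.2, fun h => ?_⟩⟩
  clear a b
  induction h with
  | base q hin hbd hc => exact h4 q hin hbd hc
  | step q q' hq ha hin hc ihq =>
      have hqin := pvReach_inb hq
      exact h3 q hqin.1 hqin.2.2.1 ihq (by simp) q' ha hin hc

lemma pv_loop_preserve (g0 : List (List Int)) (m n r c : Int) (g : List (List Int))
    (rest : List (Int × Int)) (hInv : pvInvA g0 m n g ((r, c) :: rest)) :
    pvInvA g0 m n (pvStep m n g r c).1 (rest ++ (pvStep m n g r c).2) := by
  obtain ⟨h1, h2, h3, h4⟩ := hInv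
  have hrc := h2 (r, c) List.mem_cons_self
  have hre : pvReach g0 m n (r, c) :=
    (h1 (r, c) hrc.1.1 hrc.1.2.2.1 hrc.2).2.2.2
  obtain ⟨s1, s2, s3, s4, s5, s6⟩ :=
    pv_step_go g0 m n r c hre pvDirs g [] (fun d hd => hd) h1 (by simp)
  simp only [pvStep]
  refine ⟨s1, ?_, ?_, ?_⟩
  · intro p hp
    rcases List.mem_append.1 hp with hp | hp
    · obtain ⟨hin, hM⟩ := h2 p (List.mem_cons_of_mem _ hp)
      exact ⟨hin, s2 p hin.1 hin.2.2.1 hM⟩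
    · exact s4 p hp
  · intro p ha hb hM hnotin q hadj hqin hqc
    by_cases hp : p = (r, c)
    · subst hp
      obtain ⟨d, hd, rfl⟩ := hadj
      exact s6 d hd hqin hqc
    · rcases s3 p ha hb hM with hMg | hmem
      · have hnd : p ∉ rest := fun hh => hnotin (List.mem_append.2 (Or.inl hh))
        have hndq : p ∉ (r, c) :: rest := by
          intro hh
          rcases List.mem_cons.1 hh with hh | hh
          · exact hp hh
          · exact hnd hh
        have hMq := h3 p ha hb hMg hndq q hadj hqin hqc
        exact s2 q hqin.1 hqin.2.2.1 hMq
      · exact absurd (List.mem_append.2 (Or.inr hmem)) hnotin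
  · intro p hin hbd hc
    exact s2 p hin.1 hin.2.2.1 (h4 p hin hbd hc)

lemma pv_loop_go (g0 : List (List Int)) (m n : Int) :
    ∀ (k : Nat) (g : List (List Int)) (dq : List (Int × Int)),
    2 * pvOnes g + dq.length ≤ k → pvInvA g0 m n g dq →
    (∀ p : Int × Int, 0 ≤ p.1 → 0 ≤ p.2 → pvM g0 (pvLoop m n g dq) p →
       pvCell (pvLoop m n g dq) p.1 p.2 = -1 ∧ pvCell g0 p.1 p.2 = 1)
    ∧ (∀ p : Int × Int, 0 ≤ p.1 → 0 ≤ p.2 →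
       (pvM g0 (pvLoop m n g dq) p ↔ pvReach g0 m n p)) := by
  intro k
  induction k with
  | zero =>
      intro g dq hle hInv
      have hdq : dq = [] := by
        cases dq with
        | nil => rfl
        | cons a l => simp at hle
      subst hdq
      rw [pvLoop]
      exact pv_loop_base g0 m n g hInv
  | succ k ih =>
      intro g dq hle hInv
      cases dq with
      | nil =>
          rw [pvLoop]
          exact pv_loop_base g0 m n g hInv
      | cons hd rest =>
          obtain ⟨r, c⟩ := hd
          rw [pvLoop]
          have hms := pvStep_measure m n g r c
          have hle' : 2 * pvOnes (pvStep m n g r c).1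
              + (rest ++ (pvStep m n g r c).2).length ≤ k := by
            simp only [List.length_append]
            simp only [List.length_cons] at hle
            omega
          exact ih (pvStep m n g r c).1 (rest ++ (pvStep m n g r c).2) hle'
            (pv_loop_preserve g0 m n r c g rest hInv)

lemma pv_mem_pvPos {m n : Int} {p : Int × Int} : p ∈ pvPos m n ↔ pvInb m n p := by
  obtain ⟨r, c⟩ := p
  simp only [pvPos, List.mem_flatMap, List.mem_map, PySem.List.mem_pyRange_one, pvInb,
    Prod.mk.injEq]
  constructor
  · rintro ⟨a, ⟨h1, h2⟩, b, ⟨h3, h4⟩, rfl, rfl⟩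
    exact ⟨h1, h2, h3, h4⟩
  · rintro ⟨h1, h2, h3, h4⟩
    exact ⟨r, ⟨h1, h2⟩, c, ⟨h3, h4⟩, rfl, rfl⟩

lemma pv_sweep_inv (g0 : List (List Int)) (m n : Int) :
    ∀ (l : List (Int × Int)) (s : PySem.Set (Int × Int)) (ch : Bool),
    (∀ p ∈ l, pvInb m n p) → (∀ p ∈ s, pvReach g0 m n p) →
    ∀ p ∈ (l.foldl (pvSweepB g0 m n) (s, ch)).1, pvReach g0 m n p := by
  intro l
  induction l with
  | nil => intro s ch _ hs; exact hs
  | cons p l ih =>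
      intro s ch hl hs
      have hpin : pvInb m n p := hl p List.mem_cons_self
      have hl' : ∀ q ∈ l, pvInb m n q := fun q hq => hl q (List.mem_cons_of_mem _ hq)
      simp only [List.foldl_cons]
      by_cases hG : pvG g0 m n s p
      · rw [show pvSweepB g0 m n (s, ch) p = (PySem.Set.add s p, true) from by
          simp [pvSweepB, hG]]
        have hrp : pvReach g0 m n p := by
          obtain ⟨hc, _, hdisj⟩ := hG
          rcases hdisj with h | h | h | h | h | h | h | h
          · exact pvReach.base p hpin (Or.inl h) hc
          · exact pvReach.base p hpin (Or.inr (Or.inl h)) hc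
          · exact pvReach.base p hpin (Or.inr (Or.inr (Or.inl h))) hc
          · exact pvReach.base p hpin (Or.inr (Or.inr (Or.inr h))) hc
          · exact pvReach.step _ _ (hs _ h) ⟨(1, 0), by simp [pvDirs], by simp⟩ hpin hc
          · exact pvReach.step _ _ (hs _ h) ⟨(-1, 0), by simp [pvDirs], by simp⟩ hpin hc
          · exact pvReach.step _ _ (hs _ h) ⟨(0, 1), by simp [pvDirs], by simp⟩ hpin hc
          · exact pvReach.step _ _ (hs _ h) ⟨(0, -1), by simp [pvDirs], by simp⟩ hpin hc
        refine ih (PySem.Set.add s p) true hl' ?_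
        intro q hq
        rcases (PySem.Set.mem_add _ _ _).1 hq with hq | rfl
        · exact hs q hq
        · exact hrp
      · rw [show pvSweepB g0 m n (s, ch) p = (s, ch) from by simp [pvSweepB, hG]]
        exact ih s ch hl' hs

lemma pv_sweep_fix (g0 : List (List Int)) (m n : Int) :
    ∀ (l : List (Int × Int)) (s : PySem.Set (Int × Int)),
    (l.foldl (pvSweepB g0 m n) (s, false)).2 = false →
    (l.foldl (pvSweepB g0 m n) (s, false)).1 = s ∧ ∀ p ∈ l, ¬ pvG g0 m n s p := by
  intro l
  induction l with
  | nil => intro s _; exact ⟨rfl, by simp⟩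
  | cons p l ih =>
      intro s hfin
      simp only [List.foldl_cons] at hfin ⊢
      by_cases hG : pvG g0 m n s p
      · rw [show pvSweepB g0 m n (s, false) p = (PySem.Set.add s p, true) from by
          simp [pvSweepB, hG]] at hfin
        rw [pv_sweep_true g0 m n l (PySem.Set.add s p)] at hfin
        cases hfin
      · rw [show pvSweepB g0 m n (s, false) p = (s, false) from by
          simp [pvSweepB, hG]] at hfin ⊢
        obtain ⟨h1, h2⟩ := ih s hfin
        refine ⟨h1, ?_⟩
        intro q hq
        rcases List.mem_cons.1 hq with rfl | hq'
        · exact hG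
        · exact h2 q hq'

lemma pv_sweeps_spec (g0 : List (List Int)) (m n : Int) :
    ∀ (k : Nat) (s : PySem.Set (Int × Int)), pvRem g0 m n s ≤ k →
    (∀ p ∈ s, pvReach g0 m n p) →
    (∀ p ∈ pvSweeps g0 m n s, pvReach g0 m n p)
    ∧ (∀ p ∈ pvPos m n, ¬ pvG g0 m n (pvSweeps g0 m n s) p) := by
  intro k
  induction k with
  | zero =>
      intro s hle hs
      rw [pvSweeps]
      by_cases ht : (pvSweep g0 m n (s, false)).2 = true
      · have := pvSweep_progress g0 m n s ht
        omega
      · simp only [ht, Bool.false_eq_true]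
        rw [pvSweep_eq_fold] at ht ⊢
        obtain ⟨heq, hng⟩ := pv_sweep_fix g0 m n (pvPos m n) s (by simpa using ht)
        rw [heq]
        exact ⟨hs, hng⟩
  | succ k ih =>
      intro s hle hs
      rw [pvSweeps]
      by_cases ht : (pvSweep g0 m n (s, false)).2 = true
      · simp only [ht]
        have hprog := pvSweep_progress g0 m n s ht
        refine ih (pvSweep g0 m n (s, false)).1 (by omega) ?_
        rw [pvSweep_eq_fold]
        exact pv_sweep_inv g0 m n (pvPos m n) s false
          (fun p hp => pv_mem_pvPos.1 hp) hs
      · simp only [ht, Bool.false_eq_true]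
        rw [pvSweep_eq_fold] at ht ⊢
        obtain ⟨heq, hng⟩ := pv_sweep_fix g0 m n (pvPos m n) s (by simpa using ht)
        rw [heq]
        exact ⟨hs, hng⟩

lemma pv_alt_marked (g0 : List (List Int)) (m n : Int) (p : Int × Int) :
    p ∈ pvSweeps g0 m n PySem.Set.empty ↔ pvReach g0 m n p := by
  obtain ⟨hmem, hclosed⟩ :=
    pv_sweeps_spec g0 m n (pvRem g0 m n PySem.Set.empty) PySem.Set.empty le_rfl
      (by intro q hq; simp [PySem.Set.empty] at hq)
  constructor
  · exact hmem p
  · intro h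
    induction h with
    | base q hin hbd hc =>
        by_contra hns
        refine hclosed q (pv_mem_pvPos.2 hin) ⟨hc, hns, ?_⟩
        rcases hbd with h | h | h | h
        · exact Or.inl h
        · exact Or.inr (Or.inl h)
        · exact Or.inr (Or.inr (Or.inl h))
        · exact Or.inr (Or.inr (Or.inr (Or.inl h)))
    | step q q' hq hadj hin hc ihq =>
        by_contra hns
        refine hclosed q' (pv_mem_pvPos.2 hin) ⟨hc, hns, ?_⟩
        obtain ⟨d, hd, rfl⟩ := hadj
        simp only [pvDirs, List.mem_cons, List.not_mem_nil, or_false] at hd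
        rcases hd with rfl | rfl | rfl | rfl
        · refine Or.inr (Or.inr (Or.inr (Or.inr (Or.inr (Or.inr (Or.inl ?_))))))
          simpa using ihq
        · refine Or.inr (Or.inr (Or.inr (Or.inr (Or.inl ?_))))
          simpa using ihq
        · refine Or.inr (Or.inr (Or.inr (Or.inr (Or.inr (Or.inl ?_)))))
          simpa using ihq
        · refine Or.inr (Or.inr (Or.inr (Or.inr (Or.inr (Or.inr (Or.inr ?_))))))
          simpa using ihq

lemma pv_nested_count_congr (m n : Int) (P Q : Int → Int → Prop)
    [instP : ∀ r c, Decidable (P r c)] [instQ : ∀ r c, Decidable (Q r c)]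
    (h : ∀ r c, 0 ≤ r → r < m → 0 ≤ c → c < n → (P r c ↔ Q r c)) :
    ((PySem.List.pyRange 0 m 1).foldl (fun acc r =>
      (PySem.List.pyRange 0 n 1).foldl (fun acc c => if P r c then acc + 1 else acc) acc) (0:Int))
    = ((PySem.List.pyRange 0 m 1).foldl (fun acc r =>
      (PySem.List.pyRange 0 n 1).foldl (fun acc c => if Q r c then acc + 1 else acc) acc) (0:Int)) := by
  apply PySem.List.foldl_congr_mem
  intro acc r hr
  rw [PySem.List.mem_pyRange_one] at hr
  apply PySem.List.foldl_congr_mem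
  intro acc' c hc
  rw [PySem.List.mem_pyRange_one] at hc
  exact if_congr (h r c hr.1 hr.2 hc.1 hc.2) rfl rfl

theorem pv_main (g0 : List (List Int)) : bfs_way g0 = bfs_way_alt g0 := by
  set m : Int := (g0.length : Int) with hmdef
  set n : Int := (g0.headI.length : Int) with hndef
  -- boundary scan characterisation
  have hscan : pvScan m n g0 = (pvPos m n).foldl (pvScanB m n) (g0, []) := by
    unfold pvScan
    exact pv_foldl_nested (pvScanB m n) m n (g0, [])
  have hInvS0 : pvInvS g0 m n g0 [] := by
    refine ⟨fun p _ _ h => absurd rfl h, fun p _ _ => ?_, by simp⟩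
    simp [pvM]
  obtain ⟨⟨t1, t2, t3⟩, tmono, tpost⟩ :=
    pv_scan_go g0 m n (pvPos m n) g0 [] (fun p hp => pv_mem_pvPos.1 hp) hInvS0
  rw [← hscan] at t1 t2 t3 tmono tpost
  -- invariant for the BFS loop
  have hInvA : pvInvA g0 m n (pvScan m n g0).1 (pvScan m n g0).2 := by
    refine ⟨?_, ?_, ?_, ?_⟩
    · intro p a b hM
      obtain ⟨x, y, z, w⟩ := t1 p a b hM
      exact ⟨x, y, z, pvReach.base p z w y⟩
    · intro p hp
      have hin := t3 p hp
      exact ⟨hin, (t2 p hin.1 hin.2.2.1).2 hp⟩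
    · intro p a b hM hnin q _ _ _
      exact absurd ((t2 p a b).1 hM) hnin
    · intro p hin hbd hc
      exact tpost p (pv_mem_pvPos.2 hin) hbd hc
  obtain ⟨f1, f2⟩ := pv_loop_go g0 m n
    (2 * pvOnes (pvScan m n g0).1 + (pvScan m n g0).2.length)
    (pvScan m n g0).1 (pvScan m n g0).2 le_rfl hInvA
  -- the two counting predicates agree on in-range cells
  have hiff : ∀ r c : Int, 0 ≤ r → r < m → 0 ≤ c → c < n →
      (pvCell (pvLoop m n (pvScan m n g0).1 (pvScan m n g0).2) r c = 1 ↔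
       pvCell g0 r c = 1 ∧ (r, c) ∉ pvSweeps g0 m n PySem.Set.empty) := by
    intro r c h1 h2 h3 h4
    rw [show ((r, c) ∉ pvSweeps g0 m n PySem.Set.empty) = ¬ pvReach g0 m n (r, c) from by
      rw [eq_iff_iff]; exact not_congr (pv_alt_marked g0 m n (r, c))]
    constructor
    · intro hc
      by_cases hM : pvM g0 (pvLoop m n (pvScan m n g0).1 (pvScan m n g0).2) (r, c)
      · have := (f1 (r, c) h1 h3 hM).1
        simp only at this hc
        omega
      · have hEq : pvCell (pvLoop m n (pvScan m n g0).1 (pvScan m n g0).2) r c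
            = pvCell g0 r c := not_not.1 hM
        refine ⟨by rw [← hEq]; exact hc, fun hr => hM ((f2 (r, c) h1 h3).2 hr)⟩
    · rintro ⟨hc, hnr⟩
      have hM : ¬ pvM g0 (pvLoop m n (pvScan m n g0).1 (pvScan m n g0).2) (r, c) :=
        fun hM => hnr ((f2 (r, c) h1 h3).1 hM)
      have hEq : pvCell (pvLoop m n (pvScan m n g0).1 (pvScan m n g0).2) r c
          = pvCell g0 r c := not_not.1 hM
      rw [hEq]; exact hc
  show bfs_way g0 = bfs_way_alt g0
  unfold bfs_way bfs_way_alt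
  exact pv_nested_count_congr m n _ _ hiff

-- ===== VERDICT (by name: the statement is the Claim_ definition above) =====
theorem bfs_way_spec : Claim_equal_bfs_way := by
  intro grid _ _
  exact pv_main grid
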